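-- pv_equiv track=rewrite | github.com/kevinyang372/algorithm-studies | dropbox/chemical_reaction.py | chemicalReaction
-- ===== SOURCE A (Python) =====
-- import collections
--
-- def chemicalReaction(equation):
--
--     first, second = equation.split('->')
--
--     def process(element):
--         element = element.strip()
--
--         num = 1
--         if ' ' in element:
--             num, element = element.split(' ')
--             num = int(num)
--
--         temp = collections.Counter()
--         prev = ''
--         digit = ''
--         for i in element:
--             if i.isdigit():
--                 digit += i
--             elif i.isupper():
--                 if digit != '':
--                     temp[prev] += int(digit) * num
--                     digit = ''
--                     prev = i
--                 elif prev != '':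
--                     temp[prev] += num
--                     prev = i
--                 else:
--                     prev += i
--             else:
--                 prev += i
--
--         if prev != '':
--             if digit != '':
--                 temp[prev] += int(digit) * num
--             else:
--                 temp[prev] += num
--
--         return temp
--
--     c1 = collections.Counter()
--     for i in first.split('+'):
--         c1 += process(i)
--
--     c2 = collections.Counter()
--     for t in second.split('+'):
--         c2 += process(t)
--
--     return c1 == c2
-- ===== SOURCE B (Python) =====
-- import collections
-- import re
--
-- def chemicalReaction(equation):
--     first, second = equation.split('->')
--
--     def tally(side):
--         counts = collections.Counter()
--         for term in side.split('+'):
--             term = term.strip()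
--             num = 1
--             if ' ' in term:
--                 num, term = term.split(' ')
--                 num = int(num)
--             for token in re.findall(r'[A-Z][^A-Z]*|^[^A-Z]+', term):
--                 name = ''.join(c for c in token if not c.isdigit())
--                 digits = ''.join(c for c in token if c.isdigit())
--                 counts[name] += (int(digits) if digits else 1) * num
--         return counts
--
--     return tally(first) == tally(second)
-- ===== Notes on version B (the rewrite author's own statement) =====
-- stated objective: idiomatic
-- what changed: The per-character three-buffer state machine (prev/digit accumulators with flushes on uppercase and at end) and the per-term Counter addition are replaced by a regex tokenizer whose tokens are counted directly into one Counter per side; Pre_ excludes terms whose formula part is entirely digits (A silently ignores such a nameless term, B counts it, both arbitrary on malformed input) and negative coefficients (Counter '+' silently drops negative subtotals, making A's result order-dependent).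
-- outside the precondition, e.g. on chemicalReaction('H + 12 -> H'): A returns True, B returns False; on chemicalReaction('-1 H + 1 H ->'): A returns False, B returns True
import Mathlib
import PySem

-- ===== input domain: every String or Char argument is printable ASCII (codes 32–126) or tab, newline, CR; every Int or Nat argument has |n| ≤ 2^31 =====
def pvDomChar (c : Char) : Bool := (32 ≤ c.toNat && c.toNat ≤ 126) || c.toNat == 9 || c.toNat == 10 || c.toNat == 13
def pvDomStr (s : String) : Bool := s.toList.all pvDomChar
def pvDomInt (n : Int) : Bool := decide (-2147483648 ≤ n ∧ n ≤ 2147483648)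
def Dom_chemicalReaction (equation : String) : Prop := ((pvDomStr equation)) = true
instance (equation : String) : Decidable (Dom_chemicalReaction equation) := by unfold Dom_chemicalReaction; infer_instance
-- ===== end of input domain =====

-- B replaces A's per-character state machine and per-term Counter additions by a regex
-- tokenizer whose tokens are counted directly into one Counter per side; objective:
-- idiomatic, same asymptotic cost.

-- ===== SHARED HELPERS (lines textually identical in Source A and Source B: Counter cells,
-- int(), and the coefficient extraction) =====

-- counters are dicts string -> int; keys modelled as List Char
abbrev PvCtr := PySem.Dict (List Char) Int

-- int(cs); under Pre_ every call site receives a valid int literal, so getD 0 is unreachable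
def pvIntOf (cs : List Char) : Int := (PySem.Int.ofChars? cs).getD 0

-- counts[k] += x  (Counter __setitem__ keeps position, new keys append = Dict.insert)
def pvCAdd (d : PvCtr) (k : List Char) (x : Int) : PvCtr := d.insert k (d.getD k 0 + x)

-- element.strip(); num = 1; if ' ' in element: num, element = element.split(' '); num = int(num)
-- (the `_` match arm is Python's ValueError on a multi-space split, excluded by Pre_)
def pvParseElem (el : List Char) : Int × List Char :=
  let s := PySem.Chars.strip el
  if PySem.Chars.isIn [' '] s then
    match PySem.Chars.splitOn s [' '] with
    | [n, rest] => (pvIntOf n, rest)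
    | _ => (0, [])
  else (1, s)

-- Counter == Counter (order-insensitive; missing keys count as 0)
def pvCounterEq (c d : PvCtr) : Bool :=
  c.items.all (fun kv => d.getD kv.1 0 == kv.2) && d.items.all (fun kv => c.getD kv.1 0 == kv.2)

-- ===== PORT A =====

-- c + t for Counters (Counter.__add__ / __iadd__: sum counts, keep only positive)
def pvCounterAdd (c t : PvCtr) : PvCtr :=
  let d1 := c.items.foldl (fun acc kv =>
    let s := kv.2 + t.getD kv.1 0
    if 0 < s then acc.insert kv.1 s else acc) PySem.Dict.empty
  t.items.foldl (fun acc kv =>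
    if c.contains kv.1 then acc else if 0 < kv.2 then acc.insert kv.1 kv.2 else acc) d1

-- the body of A's `for i in element` loop, state (temp, prev, digit)
def pvStepA (num : Int) (st : PvCtr × List Char × List Char) (c : Char) :
    PvCtr × List Char × List Char :=
  match st with
  | (temp, prev, digit) =>
    if PySem.Chars.isdigit c then (temp, prev, digit ++ [c])
    else if PySem.Chars.isupper c then
      if digit ≠ [] then (pvCAdd temp prev (pvIntOf digit * num), [c], [])
      else if prev ≠ [] then (pvCAdd temp prev num, [c], digit)
      else (temp, prev ++ [c], digit)
    else (temp, prev ++ [c], digit)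

-- A's `process`
def pvProcessA (el : List Char) : PvCtr :=
  match pvParseElem el with
  | (num, s) =>
    match s.foldl (pvStepA num) (PySem.Dict.empty, [], []) with
    | (temp, prev, digit) =>
      if prev ≠ [] then
        (if digit ≠ [] then pvCAdd temp prev (pvIntOf digit * num) else pvCAdd temp prev num)
      else temp

-- A: first, second = equation.split('->') (the `_` arm is Python's ValueError, excluded by Pre_)
def chemicalReaction (equation : String) : Bool :=
  match PySem.Chars.splitOn equation.toList ['-', '>'] with
  | [first, second] =>
    let c1 := (PySem.Chars.splitOn first ['+']).foldl
      (fun acc i => pvCounterAdd acc (pvProcessA i)) PySem.Dict.empty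
    let c2 := (PySem.Chars.splitOn second ['+']).foldl
      (fun acc t => pvCounterAdd acc (pvProcessA t)) PySem.Dict.empty
    pvCounterEq c1 c2
  | _ => false

-- ===== PORT B =====

-- re.findall(r'[A-Z][^A-Z]*|^[^A-Z]+', element): cut the string before every uppercase
-- letter, keeping a nonempty leading piece without uppercase; exact for this fixed pattern
def pvSegStep (st : List (List Char) × List Char) (c : Char) :
    List (List Char) × List Char :=
  if PySem.Chars.isupper c then
    (if st.2 = [] then (st.1, [c]) else (st.1 ++ [st.2], [c]))
  else (st.1, st.2 ++ [c])

def pvSegsOf (cs : List Char) : List (List Char) :=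
  match cs.foldl pvSegStep ([], []) with
  | (done, cur) => if cur = [] then done else done ++ [cur]

-- counts[name] += (int(digits) if digits else 1) * num
def pvTokAdd (num : Int) (acc : PvCtr) (seg : List Char) : PvCtr :=
  let name := seg.filter (fun c => !(PySem.Chars.isdigit c))
  let digits := seg.filter (fun c => PySem.Chars.isdigit c)
  pvCAdd acc name ((if digits ≠ [] then pvIntOf digits else 1) * num)

-- Source B's tally: one Counter per side, every token counted into it directly
def pvTally (side : List Char) : PvCtr :=
  (PySem.Chars.splitOn side ['+']).foldl (fun acc el =>
    match pvParseElem el with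
    | (num, s) => (pvSegsOf s).foldl (pvTokAdd num) acc) PySem.Dict.empty

def chemicalReaction_alt (equation : String) : Bool :=
  match PySem.Chars.splitOn equation.toList ['-', '>'] with
  | [first, second] => pvCounterEq (pvTally first) (pvTally second)
  | _ => false

-- ===== PRECONDITION & SPEC =====

-- per-term condition: the optional coefficient parses as a nonnegative int (a parse
-- failure is A's ValueError; Counter '+' drops negative subtotals, so with a negative
-- coefficient A's result depends on term order — an artefact) and the formula part is
-- not entirely digits (a nameless term, which A silently ignores — an artefact too)
def pvElemPre (el : List Char) : Bool :=
  let s := PySem.Chars.strip el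
  if PySem.Chars.isIn [' '] s then
    match PySem.Chars.splitOn s [' '] with
    | [n, f] =>
      match PySem.Int.ofChars? n with
      | some v => decide (0 ≤ v) && !(!f.isEmpty && f.all PySem.Chars.isdigit)
      | none => false
    | _ => false
  else !(!s.isEmpty && s.all PySem.Chars.isdigit)

-- Pre_ excludes: no/multiple '->' and unparsable coefficients (A raises ValueError);
-- negative coefficients and terms whose formula part is entirely digits, where A's
-- value is an order-dependent artefact of Counter '+' dropping non-positive entries
def Pre_chemicalReaction (equation : String) : Prop :=
  (PySem.Chars.splitOn equation.toList ['-', '>']).length = 2 ∧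
  ∀ side ∈ PySem.Chars.splitOn equation.toList ['-', '>'],
    ∀ el ∈ PySem.Chars.splitOn side ['+'], pvElemPre el = true

instance (equation : String) : Decidable (Pre_chemicalReaction equation) := by
  unfold Pre_chemicalReaction; infer_instance

def pvWitness_chemicalReaction : String := "2 H2 + O2 -> 2 H2O"

def Spec_chemicalReaction (equation : String) (out : Bool) : Prop := out = chemicalReaction_alt equation
instance (equation : String) (out : Bool) : Decidable (Spec_chemicalReaction equation out) := by unfold Spec_chemicalReaction; infer_instance

-- ===== CLAIM =====
def Claim_equal_chemicalReaction : Prop := ∀ (equation : String), Dom_chemicalReaction equation → Pre_chemicalReaction equation → Spec_chemicalReaction equation (chemicalReaction equation)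

-- ===== LEMMAS AND PROOFS =====

-- contribution of one token / of one term / of one side, as (key, count) pairs
def pvTok (num : Int) (seg : List Char) : List Char × Int :=
  (seg.filter (fun c => !(PySem.Chars.isdigit c)),
   (if seg.filter (fun c => PySem.Chars.isdigit c) ≠ [] then
      pvIntOf (seg.filter (fun c => PySem.Chars.isdigit c)) else 1) * num)

def pvElemContribs (el : List Char) : List (List Char × Int) :=
  match pvParseElem el with
  | (num, s) => (pvSegsOf s).map (pvTok num)

def pvSum (q : List Char) (l : List (List Char × Int)) : Int :=
  (l.map (fun p => if p.1 = q then p.2 else 0)).sum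

theorem pvSum_append (q : List Char) (l₁ l₂ : List (List Char × Int)) :
    pvSum q (l₁ ++ l₂) = pvSum q l₁ + pvSum q l₂ := by
  simp [pvSum]

theorem pvSum_nonneg {q : List Char} {l : List (List Char × Int)}
    (h : ∀ p ∈ l, 0 ≤ p.2) : 0 ≤ pvSum q l := by
  unfold pvSum
  induction l with
  | nil => simp
  | cons p l ih =>
    simp only [List.map_cons, List.sum_cons]
    have h1 : 0 ≤ p.2 := h p (by simp)
    have h2 := ih (fun p hp => h p (by simp [hp]))
    split <;> omega

theorem getD_pvCAdd (d : PvCtr) (k q : List Char) (x : Int) :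
    (pvCAdd d k x).getD q 0 = d.getD q 0 + (if q = k then x else 0) := by
  unfold pvCAdd
  rw [PySem.Dict.getD_insert]
  split <;> simp_all

theorem nodup_pvCAdd (d : PvCtr) (k : List Char) (x : Int) (h : d.keys.Nodup) :
    (pvCAdd d k x).keys.Nodup := by
  unfold pvCAdd; exact PySem.Dict.nodup_keys_insert d k _ h

-- getD after a fold of pvCAdd over (key, value) pairs
theorem getD_foldl_pairs (q : List Char) :
    ∀ (l : List (List Char × Int)) (acc : PvCtr),
      ((l.foldl (fun acc p => pvCAdd acc p.1 p.2) acc).getD q 0) = acc.getD q 0 + pvSum q l := by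
  intro l
  induction l with
  | nil => intro acc; simp [pvSum]
  | cons p l ih =>
    intro acc
    simp only [List.foldl_cons, ih, getD_pvCAdd]
    have : pvSum q (p :: l) = (if p.1 = q then p.2 else 0) + pvSum q l := by
      simp only [pvSum, List.map_cons, List.sum_cons]
    rw [this]
    have e : (if q = p.1 then p.2 else 0) = (if p.1 = q then p.2 else 0) := by
      by_cases hqq : q = p.1
      · simp [hqq]
      · rw [if_neg hqq, if_neg (fun hh => hqq hh.symm)]
    rw [e]
    ring

theorem nodup_foldl_pairs :
    ∀ (l : List (List Char × Int)) (acc : PvCtr), acc.keys.Nodup →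
      (l.foldl (fun acc p => pvCAdd acc p.1 p.2) acc).keys.Nodup := by
  intro l
  induction l with
  | nil => intro acc h; simpa
  | cons p l ih => intro acc h; exact ih _ (nodup_pvCAdd _ _ _ h)

theorem foldl_pvTokAdd_eq_pairs (num : Int) (segs : List (List Char)) (acc : PvCtr) :
    segs.foldl (pvTokAdd num) acc
      = (segs.map (pvTok num)).foldl (fun acc p => pvCAdd acc p.1 p.2) acc := by
  rw [List.foldl_map]
  rfl

-- ===== A-side: the scan equals the uniform per-token fold =====

-- a digit character is not an uppercase letter
theorem pv_digit_not_upper {c : Char} (h : PySem.Chars.isdigit c = true) :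
    PySem.Chars.isupper c = false := by
  simp only [PySem.Chars.isdigit, Bool.and_eq_true, decide_eq_true_eq, Char.le_def,
    UInt32.le_iff_toNat_le] at h
  simp only [PySem.Chars.isupper, Bool.and_eq_false_iff, decide_eq_false_iff_not, Char.le_def,
    UInt32.le_iff_toNat_le]
  have h0 : '0'.val.toNat = 48 := rfl
  have h9 : '9'.val.toNat = 57 := rfl
  have hA : 'A'.val.toNat = 65 := rfl
  omega

theorem pv_upper_not_digit {c : Char} (h : PySem.Chars.isupper c = true) :
    PySem.Chars.isdigit c = false := by
  by_cases hd : PySem.Chars.isdigit c = true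
  · rw [pv_digit_not_upper hd] at h; exact absurd h (by simp)
  · simpa using hd

-- proof-side recursive form of pvSegsOf, carrying the current partial segment
def pvSegsA (cur : List Char) : List Char → List (List Char)
  | [] => if cur = [] then [] else [cur]
  | c :: cs =>
    if PySem.Chars.isupper c then
      (if cur = [] then pvSegsA [c] cs else cur :: pvSegsA [c] cs)
    else pvSegsA (cur ++ [c]) cs

theorem pvSegsA_ne_nil {cur : List Char} (h : cur ≠ []) : ∀ cs, pvSegsA cur cs ≠ [] := by
  intro cs
  induction cs generalizing cur with
  | nil => simp [pvSegsA, h]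
  | cons c cs ih =>
    simp only [pvSegsA]
    split
    · simp
    · exact ih (by simp)

theorem pvSegsOf_fold (cs : List Char) :
    ∀ done cur,
      (match cs.foldl pvSegStep (done, cur) with
       | (d, c) => if c = [] then d else d ++ [c]) = done ++ pvSegsA cur cs := by
  induction cs with
  | nil => intro done cur; simp only [List.foldl_nil, pvSegsA]; split <;> simp
  | cons c cs ih =>
    intro done cur
    simp only [List.foldl_cons, pvSegsA, pvSegStep]
    by_cases hu : PySem.Chars.isupper c = true
    · by_cases hc : cur = []
      · simp [hu, hc, ih]
      · simp [hu, hc, ih]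
    · simp [hu, ih]

theorem pvSegsOf_eq (cs : List Char) : pvSegsOf cs = pvSegsA [] cs := by
  have := pvSegsOf_fold cs [] []
  simpa [pvSegsOf] using this

-- members of pvSegsA are nonempty segments
theorem pvSegsA_mem_ne_nil :
    ∀ (cs cur : List Char), cur ≠ [] → ∀ seg ∈ pvSegsA cur cs, seg ≠ [] := by
  intro cs
  induction cs with
  | nil => intro cur h seg hs; simp [pvSegsA, h] at hs; simpa [hs]
  | cons c cs ih =>
    intro cur h seg hs
    simp only [pvSegsA] at hs
    by_cases hu : PySem.Chars.isupper c = true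
    · rw [if_pos hu, if_neg h] at hs
      rcases List.mem_cons.mp hs with rfl | hs
      · exact h
      · exact ih [c] (by simp) seg hs
    · rw [if_neg hu] at hs
      exact ih (cur ++ [c]) (by simp) seg hs

-- the last segment either contains an uppercase letter or is the whole remaining input
theorem pvSegsA_last :
    ∀ (cs cur : List Char), cur ≠ [] →
      ∃ l segs', pvSegsA cur cs = segs' ++ [l] ∧
        ((l.any (fun c => PySem.Chars.isupper c)) = true ∨ l = cur ++ cs) := by
  intro cs
  induction cs with
  | nil => intro cur h; exact ⟨cur, [], by simp [pvSegsA, h], Or.inr (by simp)⟩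
  | cons c cs ih =>
    intro cur h
    simp only [pvSegsA]
    by_cases hu : PySem.Chars.isupper c = true
    · rw [if_pos hu, if_neg h]
      obtain ⟨l, segs', he, hl⟩ := ih [c] (by simp)
      refine ⟨l, cur :: segs', by simp [he], Or.inl ?_⟩
      rcases hl with hl | rfl
      · exact hl
      · simp [hu]
    · rw [if_neg hu]
      obtain ⟨l, segs', he, hl⟩ := ih (cur ++ [c]) (by simp)
      refine ⟨l, segs', he, ?_⟩
      rcases hl with hl | rfl
      · exact Or.inl hl
      · exact Or.inr (by simp)

-- flushes as they occur in A's scan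
def pvMidFlush (num : Int) (temp : PvCtr) (seg : List Char) : PvCtr :=
  let name := seg.filter (fun c => !(PySem.Chars.isdigit c))
  let digits := seg.filter (fun c => PySem.Chars.isdigit c)
  if name ≠ [] ∨ digits ≠ [] then
    pvCAdd temp name ((if digits ≠ [] then pvIntOf digits else 1) * num)
  else temp

def pvLastFlush (num : Int) (temp : PvCtr) (seg : List Char) : PvCtr :=
  let name := seg.filter (fun c => !(PySem.Chars.isdigit c))
  let digits := seg.filter (fun c => PySem.Chars.isdigit c)
  if name ≠ [] then
    pvCAdd temp name ((if digits ≠ [] then pvIntOf digits else 1) * num)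
  else temp

def pvProcSegs (num : Int) (temp : PvCtr) : List (List Char) → PvCtr
  | [] => temp
  | [seg] => pvLastFlush num temp seg
  | seg :: rest => pvProcSegs num (pvMidFlush num temp seg) rest

-- if both the digit and the non-digit chars of cur are gone, cur was empty
theorem pv_filter_both_nil {cur : List Char}
    (h1 : cur.filter (fun c => !(PySem.Chars.isdigit c)) = [])
    (h2 : cur.filter (fun c => PySem.Chars.isdigit c) = []) : cur = [] := by
  cases cur with
  | nil => rfl
  | cons c cs =>
    by_cases hd : PySem.Chars.isdigit c = true
    · simp [hd] at h2
    · simp [hd] at h1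

theorem pvProcSegs_cons (num : Int) (temp : PvCtr) (seg : List Char) {rest : List (List Char)}
    (h : rest ≠ []) :
    pvProcSegs num temp (seg :: rest) = pvProcSegs num (pvMidFlush num temp seg) rest := by
  cases rest with
  | nil => exact absurd rfl h
  | cons a l => rfl

-- MAIN SCAN LEMMA: A's loop + final flush equals the per-segment flushes, for any
-- partially consumed segment cur (prev = its non-digits, digit = its digits)
theorem pv_scan_eq_segs (num : Int) :
    ∀ (cs : List Char) (temp : PvCtr) (cur : List Char),
      (match cs.foldl (pvStepA num)
          (temp, cur.filter (fun c => !(PySem.Chars.isdigit c)),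
                 cur.filter (fun c => PySem.Chars.isdigit c)) with
       | (t, p, d) =>
         if p ≠ [] then (if d ≠ [] then pvCAdd t p (pvIntOf d * num) else pvCAdd t p num)
         else t) = pvProcSegs num temp (pvSegsA cur cs) := by
  intro cs
  induction cs with
  | nil =>
    intro temp cur
    simp only [List.foldl_nil, pvSegsA]
    by_cases hc : cur = []
    · simp [hc, pvProcSegs]
    · rw [if_neg hc]
      have hsingle : pvProcSegs num temp [cur] = pvLastFlush num temp cur := rfl
      rw [hsingle]
      by_cases hp : cur.filter (fun c => !(PySem.Chars.isdigit c)) = []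
      · have : ¬ (cur.filter (fun c => PySem.Chars.isdigit c) = []) := by
          intro h2; exact hc (pv_filter_both_nil hp h2)
        simp [hp, pvLastFlush]
      · by_cases hd : cur.filter (fun c => PySem.Chars.isdigit c) = []
        · simp [hp, hd, pvLastFlush]
        · simp [hp, hd, pvLastFlush]
  | cons c cs ih =>
    intro temp cur
    simp only [List.foldl_cons, pvSegsA]
    by_cases hdg : PySem.Chars.isdigit c = true
    · have hu := pv_digit_not_upper hdg
      have e1 : (cur ++ [c]).filter (fun c => !(PySem.Chars.isdigit c))
          = cur.filter (fun c => !(PySem.Chars.isdigit c)) := by simp [hdg]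
      have e2 : (cur ++ [c]).filter (fun c => PySem.Chars.isdigit c)
          = cur.filter (fun c => PySem.Chars.isdigit c) ++ [c] := by simp [hdg]
      have := ih temp (cur ++ [c])
      rw [e1, e2] at this
      simpa [pvStepA, hdg, hu] using this
    · by_cases hup : PySem.Chars.isupper c = true
      · by_cases hc : cur = []
        · subst hc
          have := ih temp [c]
          simpa [pvStepA, hdg, hup] using this
        · have hrest := pvSegsA_ne_nil (cur := [c]) (by simp) cs
          rw [if_pos hup, if_neg hc, pvProcSegs_cons num temp cur hrest]
          have := ih (pvMidFlush num temp cur) [c]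
          simp only [List.filter_cons, List.filter_nil, hdg, Bool.not_false, if_pos] at this ⊢
          by_cases hd : cur.filter (fun c => PySem.Chars.isdigit c) = []
          · have hp : ¬ (cur.filter (fun c => !(PySem.Chars.isdigit c)) = []) := by
              intro h1; exact hc (pv_filter_both_nil h1 hd)
            rw [← this]
            simp [pvStepA, hdg, hup, hd, hp, pvMidFlush]
          · rw [← this]
            simp [pvStepA, hdg, hup, hd, pvMidFlush]
      · have e1 : (cur ++ [c]).filter (fun c => !(PySem.Chars.isdigit c))
            = cur.filter (fun c => !(PySem.Chars.isdigit c)) ++ [c] := by simp [hdg]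
        have e2 : (cur ++ [c]).filter (fun c => PySem.Chars.isdigit c)
            = cur.filter (fun c => PySem.Chars.isdigit c) := by simp [hdg]
        have := ih temp (cur ++ [c])
        rw [e1, e2] at this
        simpa [pvStepA, hdg, hup] using this

-- the per-segment flushes equal the uniform token fold when every segment is nonempty
-- and the last one has a non-digit character
theorem pvProcSegs_eq_foldl (num : Int) :
    ∀ (segs : List (List Char)) (temp : PvCtr),
      (∀ seg ∈ segs, seg ≠ []) →
      (∀ l segs', segs = segs' ++ [l] → l.filter (fun c => !(PySem.Chars.isdigit c)) ≠ []) →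
      pvProcSegs num temp segs = segs.foldl (pvTokAdd num) temp := by
  intro segs
  induction segs with
  | nil => intro temp _ _; rfl
  | cons seg rest ih =>
    intro temp hne hlast
    cases rest with
    | nil =>
      have hl := hlast seg [] rfl
      simp only [pvProcSegs, List.foldl_cons, List.foldl_nil]
      simp [pvLastFlush, hl, pvTokAdd]
    | cons a l =>
      rw [pvProcSegs_cons num temp seg (by simp)]
      rw [ih _ (fun s hs => hne s (by simp [hs]))
        (fun l' segs' he => hlast l' (seg :: segs') (by simp [he]))]
      simp only [List.foldl_cons]
      have hs := hne seg (by simp)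
      have : seg.filter (fun c => !(PySem.Chars.isdigit c)) ≠ [] ∨
          seg.filter (fun c => PySem.Chars.isdigit c) ≠ [] := by
        by_contra hcon
        push Not at hcon
        exact hs (pv_filter_both_nil hcon.1 hcon.2)
      congr 1
      unfold pvMidFlush pvTokAdd
      rw [if_pos this]

-- facts Pre_ gives about one term
theorem pvElemPre_facts {el : List Char} (h : pvElemPre el = true) :
    0 ≤ (pvParseElem el).1 ∧
      ¬((pvParseElem el).2 ≠ [] ∧ (pvParseElem el).2.all PySem.Chars.isdigit = true) := by
  unfold pvElemPre at h
  unfold pvParseElem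
  by_cases hin : PySem.Chars.isIn [' '] (PySem.Chars.strip el) = true
  · rw [if_pos hin] at h ⊢
    rcases hsp : PySem.Chars.splitOn (PySem.Chars.strip el) [' '] with _ | ⟨n, _ | ⟨f, _ | _⟩⟩ <;>
        rw [hsp] at h <;> dsimp only at h ⊢
    · exact absurd h (by simp)
    · exact absurd h (by simp)
    · cases hof : PySem.Int.ofChars? n with
      | none => rw [hof] at h; exact absurd h (by simp)
      | some v =>
        rw [hof] at h
        simp only [Bool.and_eq_true, decide_eq_true_eq, Bool.not_eq_true',
          Bool.and_eq_false_iff] at h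
        constructor
        · simpa [pvIntOf, hof] using h.1
        · rcases h.2 with h2 | h2
          · intro hc
            exact hc.1 (List.isEmpty_iff.mp (by simpa using h2))
          · intro hc; rw [hc.2] at h2; exact absurd h2 (by simp)
    · exact absurd h (by simp)
  · rw [if_neg hin] at h ⊢
    refine ⟨by norm_num, ?_⟩
    simp only [Bool.not_eq_true', Bool.and_eq_false_iff] at h
    rcases h with h2 | h2
    · intro hc
      exact hc.1 (List.isEmpty_iff.mp (by simpa using h2))
    · intro hc; rw [hc.2] at h2; exact absurd h2 (by simp)

-- an all-digit string has a nonnegative int() value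
theorem pv_mapopt_nonneg (o : Option Nat) :
    0 ≤ (Option.map (fun n : Int => n) (o >>= fun a => pure ((a : Nat) : Int))).getD 0 := by
  cases o <;> simp

theorem pv_digit_not_intspace {c : Char} (h : PySem.Chars.isdigit c = true) :
    PySem.Int.isIntSpace c = false := by
  simp only [PySem.Chars.isdigit, Bool.and_eq_true, decide_eq_true_eq, Char.le_def,
    UInt32.le_iff_toNat_le] at h
  have h0 : '0'.val.toNat = 48 := rfl
  have h9 : '9'.val.toNat = 57 := rfl
  simp only [PySem.Int.isIntSpace, Bool.or_eq_false_iff, decide_eq_false_iff_not]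
  refine ⟨⟨⟨⟨⟨?_, ?_⟩, ?_⟩, ?_⟩, ?_⟩, ?_⟩ <;> rintro rfl <;> simp_all

theorem pv_dropWhile_intspace_of_digits {cs : List Char}
    (h : ∀ c ∈ cs, PySem.Chars.isdigit c = true) :
    cs.dropWhile PySem.Int.isIntSpace = cs := by
  cases cs with
  | nil => rfl
  | cons c cs' =>
    rw [List.dropWhile_cons_of_neg]
    simp [pv_digit_not_intspace (h c (by simp))]

theorem pvIntOf_digits_nonneg {cs : List Char} (h : cs.all PySem.Chars.isdigit = true) :
    0 ≤ pvIntOf cs := by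
  have hall : ∀ c ∈ cs, PySem.Chars.isdigit c = true := by
    intro c hc; exact List.all_eq_true.mp h c hc
  have hall' : ∀ c ∈ cs.reverse, PySem.Chars.isdigit c = true := by
    intro c hc; exact hall c (List.mem_reverse.mp hc)
  unfold pvIntOf PySem.Int.ofChars?
  rw [pv_dropWhile_intspace_of_digits hall, pv_dropWhile_intspace_of_digits hall',
    List.reverse_reverse]
  dsimp only
  split
  · rename_i ds
    exact absurd (hall '-' (by simp)) (by decide)
  · rename_i ds
    exact absurd (hall '+' (by simp)) (by decide)
  · exact pv_mapopt_nonneg _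

-- the per-element contributions are nonnegative under Pre_
theorem pvElemContribs_nonneg {el : List Char} (h : pvElemPre el = true) :
    ∀ p ∈ pvElemContribs el, 0 ≤ p.2 := by
  intro p hp
  have hnum := (pvElemPre_facts h).1
  unfold pvElemContribs at hp
  rcases hpe : pvParseElem el with ⟨num, s⟩
  rw [hpe] at hp hnum
  simp only [List.mem_map] at hp
  obtain ⟨seg, _, rfl⟩ := hp
  unfold pvTok
  apply mul_nonneg _ hnum
  split
  · apply pvIntOf_digits_nonneg
    simp only [List.all_eq_true]
    intro c hc
    exact (List.mem_filter.mp hc).2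
  · norm_num

-- under Pre_, A's process equals the uniform token fold from the empty counter
theorem pvProcessA_eq_fold {el : List Char} (h : pvElemPre el = true) :
    pvProcessA el =
      match pvParseElem el with
      | (num, s) => (pvSegsOf s).foldl (pvTokAdd num) PySem.Dict.empty := by
  have hfacts := (pvElemPre_facts h).2
  unfold pvProcessA
  rcases hpe : pvParseElem el with ⟨num, s⟩
  rw [hpe] at hfacts
  simp only
  have hscan := pv_scan_eq_segs num s PySem.Dict.empty []
  simp only [List.filter_nil] at hscan
  rw [hscan, pvSegsOf_eq]
  cases s with
  | nil => rfl
  | cons c cs =>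
    have hstep : pvSegsA [] (c :: cs) = pvSegsA [c] cs := by
      simp only [pvSegsA]
      split <;> simp
    rw [hstep]
    apply pvProcSegs_eq_foldl
    · exact pvSegsA_mem_ne_nil cs [c] (by simp)
    · intro l segs' he
      obtain ⟨l', segs'', he', hl'⟩ := pvSegsA_last cs [c] (by simp)
      have hll : l = l' := by
        have h1 : (segs' ++ [l]).getLast? = some l := by simp
        have h2 : (segs'' ++ [l']).getLast? = some l' := by simp
        rw [← he, he'] at h1
        rw [h2] at h1
        exact (Option.some_inj.mp h1).symm
      subst hll
      rcases hl' with hup | hwhole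
      · simp only [List.any_eq_true] at hup
        obtain ⟨u, hu, hup⟩ := hup
        have : u ∈ l.filter (fun c => !(PySem.Chars.isdigit c)) :=
          List.mem_filter.mpr ⟨hu, by simp [pv_upper_not_digit hup]⟩
        exact List.ne_nil_of_mem this
      · subst hwhole
        have hnd : ¬(([c] ++ cs).all PySem.Chars.isdigit = true) := by
          intro hall
          exact hfacts ⟨by simp, hall⟩
        simp only [List.all_eq_true, not_forall] at hnd
        obtain ⟨u, hu, hup⟩ := hnd
        have : u ∈ ([c] ++ cs).filter (fun c => !(PySem.Chars.isdigit c)) :=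
          List.mem_filter.mpr ⟨hu, by simpa using hup⟩
        exact List.ne_nil_of_mem this

-- ===== Counter addition: getD formula =====

def pvF1 (t : PvCtr) (acc : PvCtr) (l : List (List Char × Int)) : PvCtr :=
  l.foldl (fun acc kv =>
    let s := kv.2 + t.getD kv.1 0
    if 0 < s then acc.insert kv.1 s else acc) acc

def pvF2 (c : PvCtr) (acc : PvCtr) (l : List (List Char × Int)) : PvCtr :=
  l.foldl (fun acc kv =>
    if c.contains kv.1 then acc else if 0 < kv.2 then acc.insert kv.1 kv.2 else acc) acc

theorem pvCounterAdd_eq (c t : PvCtr) :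
    pvCounterAdd c t = pvF2 c (pvF1 t PySem.Dict.empty c.items) t.items := rfl

theorem getD_pvF1_not_mem {t : PvCtr} {l : List (List Char × Int)} {q : List Char} :
    ∀ {acc : PvCtr}, q ∉ l.map (·.1) → (pvF1 t acc l).getD q 0 = acc.getD q 0 := by
  induction l with
  | nil => intro acc _; rfl
  | cons kv l ih =>
    intro acc h
    simp only [List.map_cons, List.mem_cons, not_or] at h
    simp only [pvF1, List.foldl_cons]
    rw [show (List.foldl _ _ l : PvCtr) = pvF1 t _ l from rfl, ih h.2]
    split
    · rw [PySem.Dict.getD_insert, if_neg h.1]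
    · rfl

theorem getD_pvF1_mem {t : PvCtr} {l : List (List Char × Int)} {q : List Char} {v : Int} :
    ∀ {acc : PvCtr}, (l.map (·.1)).Nodup → (q, v) ∈ l →
    (pvF1 t acc l).getD q 0 =
      if 0 < v + t.getD q 0 then v + t.getD q 0 else acc.getD q 0 := by
  induction l with
  | nil => intro acc _ hm; exact absurd hm (by simp)
  | cons kv l ih =>
    intro acc hnd hm
    simp only [List.map_cons, List.nodup_cons] at hnd
    rcases List.mem_cons.mp hm with he | hm
    · have hq : kv.1 = q := by rw [← he]
      have hv : kv.2 = v := by rw [← he]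
      have hnotin : q ∉ l.map (·.1) := by rw [← hq]; exact hnd.1
      simp only [pvF1, List.foldl_cons]
      rw [show (List.foldl _ _ l : PvCtr) = pvF1 t _ l from rfl]
      rw [getD_pvF1_not_mem hnotin, hq, hv]
      split
      · rw [PySem.Dict.getD_insert, if_pos rfl]
      · rfl
    · have hne : kv.1 ≠ q := by
        intro he'
        exact hnd.1 (he' ▸ (List.mem_map.mpr ⟨(q, v), hm, rfl⟩))
      simp only [pvF1, List.foldl_cons]
      rw [show (List.foldl _ _ l : PvCtr) = pvF1 t _ l from rfl]
      rw [ih hnd.2 hm]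
      congr 1
      split
      · rw [PySem.Dict.getD_insert, if_neg (fun hh => hne hh.symm)]
      · rfl

theorem getD_pvF2_contains {c : PvCtr} {l : List (List Char × Int)} {q : List Char}
    (h : c.contains q = true) :
    ∀ {acc : PvCtr}, (pvF2 c acc l).getD q 0 = acc.getD q 0 := by
  induction l with
  | nil => intro acc; rfl
  | cons kv l ih =>
    intro acc
    simp only [pvF2, List.foldl_cons]
    rw [show (List.foldl _ _ l : PvCtr) = pvF2 c _ l from rfl, ih]
    by_cases hc : c.contains kv.1 = true
    · rw [if_pos hc]
    · rw [if_neg hc]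
      have hne : kv.1 ≠ q := fun he => hc (he ▸ h)
      split
      · rw [PySem.Dict.getD_insert, if_neg (fun hh => hne hh.symm)]
      · rfl

theorem getD_pvF2_not_mem {c : PvCtr} {l : List (List Char × Int)} {q : List Char} :
    ∀ {acc : PvCtr}, q ∉ l.map (·.1) → (pvF2 c acc l).getD q 0 = acc.getD q 0 := by
  induction l with
  | nil => intro acc _; rfl
  | cons kv l ih =>
    intro acc h
    simp only [List.map_cons, List.mem_cons, not_or] at h
    simp only [pvF2, List.foldl_cons]
    rw [show (List.foldl _ _ l : PvCtr) = pvF2 c _ l from rfl, ih h.2]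
    split
    · rfl
    · split
      · rw [PySem.Dict.getD_insert, if_neg h.1]
      · rfl

theorem getD_pvF2_mem {c : PvCtr} {l : List (List Char × Int)} {q : List Char} {v : Int} :
    ∀ {acc : PvCtr}, (l.map (·.1)).Nodup → (q, v) ∈ l → c.contains q = false →
    (pvF2 c acc l).getD q 0 = if 0 < v then v else acc.getD q 0 := by
  induction l with
  | nil => intro acc _ hm _; exact absurd hm (by simp)
  | cons kv l ih =>
    intro acc hnd hm hc
    simp only [List.map_cons, List.nodup_cons] at hnd
    rcases List.mem_cons.mp hm with he | hm
    · have hq : kv.1 = q := by rw [← he]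
      have hv : kv.2 = v := by rw [← he]
      have hnotin : q ∉ l.map (·.1) := by rw [← hq]; exact hnd.1
      simp only [pvF2, List.foldl_cons]
      rw [show (List.foldl _ _ l : PvCtr) = pvF2 c _ l from rfl]
      rw [getD_pvF2_not_mem hnotin, hq, hv]
      rw [if_neg (by simp [hc])]
      split
      · rw [PySem.Dict.getD_insert, if_pos rfl]
      · rfl
    · have hne : kv.1 ≠ q := by
        intro he'
        exact hnd.1 (he' ▸ (List.mem_map.mpr ⟨(q, v), hm, rfl⟩))
      simp only [pvF2, List.foldl_cons]
      rw [show (List.foldl _ _ l : PvCtr) = pvF2 c _ l from rfl]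
      rw [ih hnd.2 hm hc]
      congr 1
      split
      · rfl
      · split
        · rw [PySem.Dict.getD_insert, if_neg (fun hh => hne hh.symm)]
        · rfl

theorem pv_keys_eq_items_map (d : PvCtr) : d.keys = d.items.map (·.1) := rfl

theorem getD_pvCounterAdd (c t : PvCtr) (hc : c.keys.Nodup) (ht : t.keys.Nodup)
    (q : List Char) :
    (pvCounterAdd c t).getD q 0 = max (c.getD q 0 + t.getD q 0) 0 := by
  rw [pvCounterAdd_eq]
  have hcnd : (c.items.map (·.1)).Nodup := by rw [← pv_keys_eq_items_map]; exact hc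
  have htnd : (t.items.map (·.1)).Nodup := by rw [← pv_keys_eq_items_map]; exact ht
  by_cases hcq : c.contains q = true
  · rcases ho : c.get? q with _ | w
    · rw [(PySem.Dict.get?_eq_none_iff_contains c q).mp ho] at hcq
      exact absurd hcq (by simp)
    · have hm := PySem.Dict.mem_items_of_get?_eq_some c ho
      have hgd : c.getD q 0 = w := PySem.Dict.getD_of_get?_eq_some c 0 ho
      rw [getD_pvF2_contains hcq, getD_pvF1_mem hcnd hm, hgd, PySem.Dict.getD_empty]
      split <;> omega
  · have hcq' : c.contains q = false := by simpa using hcq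
    have h0 : c.getD q 0 = 0 := PySem.Dict.getD_of_not_contains c 0 hcq'
    have hqni : q ∉ c.items.map (·.1) := by
      intro hmem
      rw [(PySem.Dict.contains_iff_mem_keys c q).mpr (by rw [pv_keys_eq_items_map]; exact hmem)]
        at hcq'
      exact absurd hcq' (by simp)
    by_cases htq : t.contains q = true
    · rcases ho : t.get? q with _ | w
      · rw [(PySem.Dict.get?_eq_none_iff_contains t q).mp ho] at htq
        exact absurd htq (by simp)
      · have hm := PySem.Dict.mem_items_of_get?_eq_some t ho
        have hgd : t.getD q 0 = w := PySem.Dict.getD_of_get?_eq_some t 0 ho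
        rw [getD_pvF2_mem htnd hm hcq', getD_pvF1_not_mem hqni, PySem.Dict.getD_empty, h0, hgd]
        split <;> omega
    · have htq' : t.contains q = false := by simpa using htq
      have ht0 : t.getD q 0 = 0 := PySem.Dict.getD_of_not_contains t 0 htq'
      have hqnt : q ∉ t.items.map (·.1) := by
        intro hmem
        rw [(PySem.Dict.contains_iff_mem_keys t q).mpr (by rw [pv_keys_eq_items_map]; exact hmem)]
          at htq'
        exact absurd htq' (by simp)
      rw [getD_pvF2_not_mem hqnt, getD_pvF1_not_mem hqni, PySem.Dict.getD_empty, h0, ht0]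
      omega

theorem nodup_pvF1 (t : PvCtr) (l : List (List Char × Int)) :
    ∀ (acc : PvCtr), acc.keys.Nodup → (pvF1 t acc l).keys.Nodup := by
  induction l with
  | nil => intro acc h; exact h
  | cons kv l ih =>
    intro acc h
    simp only [pvF1, List.foldl_cons]
    rw [show (List.foldl _ _ l : PvCtr) = pvF1 t _ l from rfl]
    apply ih
    split
    · exact PySem.Dict.nodup_keys_insert acc kv.1 _ h
    · exact h

theorem nodup_pvF2 (c : PvCtr) (l : List (List Char × Int)) :
    ∀ (acc : PvCtr), acc.keys.Nodup → (pvF2 c acc l).keys.Nodup := by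
  induction l with
  | nil => intro acc h; exact h
  | cons kv l ih =>
    intro acc h
    simp only [pvF2, List.foldl_cons]
    rw [show (List.foldl _ _ l : PvCtr) = pvF2 c _ l from rfl]
    apply ih
    split
    · exact h
    · split
      · exact PySem.Dict.nodup_keys_insert acc kv.1 _ h
      · exact h

theorem nodup_pvCounterAdd (c t : PvCtr) : (pvCounterAdd c t).keys.Nodup := by
  rw [pvCounterAdd_eq]
  exact nodup_pvF2 c t.items _ (nodup_pvF1 t c.items PySem.Dict.empty (by simp [PySem.Dict.empty]))

-- ===== side-level folds =====

-- A's side fold: getD is the sum of all contributions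
-- the per-element counter A builds: getD = the element's contribution sums, keys Nodup
theorem pvProcessA_getD {el : List Char} (h : pvElemPre el = true) (q : List Char) :
    (pvProcessA el).getD q 0 = pvSum q (pvElemContribs el) := by
  rw [pvProcessA_eq_fold h]
  unfold pvElemContribs
  rcases hpe : pvParseElem el with ⟨num, s⟩
  simp only
  rw [foldl_pvTokAdd_eq_pairs, getD_foldl_pairs, PySem.Dict.getD_empty]
  ring

theorem nodup_pvProcessA {el : List Char} (h : pvElemPre el = true) :
    (pvProcessA el).keys.Nodup := by
  rw [pvProcessA_eq_fold h]
  rcases hpe : pvParseElem el with ⟨num, s⟩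
  simp only
  rw [foldl_pvTokAdd_eq_pairs]
  exact nodup_foldl_pairs _ _ (by simp [PySem.Dict.empty])

theorem pvSideA_getD :
    ∀ (els : List (List Char)) (acc : PvCtr), acc.keys.Nodup → (∀ q, 0 ≤ acc.getD q 0) →
      (∀ el ∈ els, pvElemPre el = true) →
      (∀ q, (els.foldl (fun c el => pvCounterAdd c (pvProcessA el)) acc).getD q 0
          = acc.getD q 0 + pvSum q (els.flatMap pvElemContribs)) ∧
        (els.foldl (fun c el => pvCounterAdd c (pvProcessA el)) acc).keys.Nodup := by
  intro els
  induction els with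
  | nil => intro acc hnd hpos _; exact ⟨fun q => by simp [pvSum], hnd⟩
  | cons el els ih =>
    intro acc hnd hpos hpre
    have hel : pvElemPre el = true := hpre el (by simp)
    have hpe_nd := nodup_pvProcessA hel
    have hstep : ∀ q, (pvCounterAdd acc (pvProcessA el)).getD q 0
        = acc.getD q 0 + pvSum q (pvElemContribs el) := by
      intro q
      rw [getD_pvCounterAdd acc (pvProcessA el) hnd hpe_nd q, pvProcessA_getD hel]
      have h1 := hpos q
      have h2 := pvSum_nonneg (q := q) (pvElemContribs_nonneg hel)
      omega
    have hstep_pos : ∀ q, 0 ≤ (pvCounterAdd acc (pvProcessA el)).getD q 0 := by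
      intro q
      rw [hstep q]
      have h1 := hpos q
      have h2 := pvSum_nonneg (q := q) (pvElemContribs_nonneg hel)
      omega
    obtain ⟨hg, hn⟩ := ih (pvCounterAdd acc (pvProcessA el)) (nodup_pvCounterAdd _ _)
      hstep_pos (fun e he => hpre e (by simp [he]))
    refine ⟨fun q => ?_, hn⟩
    simp only [List.foldl_cons, List.flatMap_cons]
    rw [hg q, hstep q, pvSum_append]
    ring

-- B's side fold: same sums
theorem pvTally_fold_getD (q : List Char) :
    ∀ (els : List (List Char)) (acc : PvCtr),
      ((els.foldl (fun acc el =>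
          match pvParseElem el with
          | (num, s) => (pvSegsOf s).foldl (pvTokAdd num) acc) acc).getD q 0)
        = acc.getD q 0 + pvSum q (els.flatMap pvElemContribs) := by
  intro els
  induction els with
  | nil => intro acc; simp [pvSum]
  | cons el els ih =>
    intro acc
    simp only [List.foldl_cons, List.flatMap_cons]
    rw [ih, pvSum_append]
    rcases hpe : pvParseElem el with ⟨num, s⟩
    simp only
    rw [foldl_pvTokAdd_eq_pairs, getD_foldl_pairs]
    unfold pvElemContribs
    rw [hpe]
    ring

theorem pvTally_getD (side : List Char) (q : List Char) :
    (pvTally side).getD q 0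
      = pvSum q ((PySem.Chars.splitOn side ['+']).flatMap pvElemContribs) := by
  unfold pvTally
  rw [pvTally_fold_getD, PySem.Dict.getD_empty]
  ring

theorem nodup_pvTally_fold :
    ∀ (els : List (List Char)) (acc : PvCtr), acc.keys.Nodup →
      ((els.foldl (fun acc el =>
          match pvParseElem el with
          | (num, s) => (pvSegsOf s).foldl (pvTokAdd num) acc) acc).keys.Nodup) := by
  intro els
  induction els with
  | nil => intro acc h; exact h
  | cons el els ih =>
    intro acc h
    simp only [List.foldl_cons]
    apply ih
    rcases hpe : pvParseElem el with ⟨num, s⟩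
    simp only
    rw [foldl_pvTokAdd_eq_pairs]
    exact nodup_foldl_pairs _ _ h

theorem nodup_pvTally (side : List Char) : (pvTally side).keys.Nodup := by
  unfold pvTally
  exact nodup_pvTally_fold _ _ (by simp [PySem.Dict.empty])

-- Counter equality only looks at getD
theorem pvCounterEq_iff {c d : PvCtr} (hc : c.keys.Nodup) (hd : d.keys.Nodup) :
    pvCounterEq c d = true ↔ ∀ q, c.getD q 0 = d.getD q 0 := by
  unfold pvCounterEq
  simp only [Bool.and_eq_true, List.all_eq_true, beq_iff_eq]
  constructor
  · rintro ⟨h1, h2⟩ q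
    by_cases hq : c.contains q = true
    · rcases ho : c.get? q with _ | w
      · rw [(PySem.Dict.get?_eq_none_iff_contains c q).mp ho] at hq
        exact absurd hq (by simp)
      · have hm := PySem.Dict.mem_items_of_get?_eq_some c ho
        rw [PySem.Dict.getD_of_get?_eq_some c 0 ho]
        exact (h1 (q, w) hm).symm
    · by_cases hq2 : d.contains q = true
      · rcases ho : d.get? q with _ | w
        · rw [(PySem.Dict.get?_eq_none_iff_contains d q).mp ho] at hq2
          exact absurd hq2 (by simp)
        · have hm := PySem.Dict.mem_items_of_get?_eq_some d ho
          rw [PySem.Dict.getD_of_get?_eq_some d 0 ho]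
          exact h2 (q, w) hm
      · rw [PySem.Dict.getD_of_not_contains c 0 (by simpa using hq),
          PySem.Dict.getD_of_not_contains d 0 (by simpa using hq2)]
  · intro hall
    constructor
    · intro kv hm
      rw [← PySem.Dict.getD_of_mem_items c hm hc 0]
      exact (hall kv.1).symm
    · intro kv hm
      rw [← PySem.Dict.getD_of_mem_items d hm hd 0]
      exact hall kv.1

-- ===== VERDICT =====
theorem chemicalReaction_spec : Claim_equal_chemicalReaction := by
  intro equation _ hpre
  unfold Spec_chemicalReaction chemicalReaction chemicalReaction_alt
  obtain ⟨hlen, hels⟩ := hpre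
  rcases hsp : PySem.Chars.splitOn equation.toList ['-', '>'] with _ | ⟨f, _ | ⟨sd, _ | _⟩⟩ <;>
      rw [hsp] at hlen <;> try simp at hlen
  rw [hsp] at hels
  dsimp only
  have hf := hels f (by simp)
  have hs := hels sd (by simp)
  have hA1 := pvSideA_getD (PySem.Chars.splitOn f ['+']) PySem.Dict.empty
    (by simp [PySem.Dict.empty]) (by simp) hf
  have hA2 := pvSideA_getD (PySem.Chars.splitOn sd ['+']) PySem.Dict.empty
    (by simp [PySem.Dict.empty]) (by simp) hs
  have hgd : ∀ q, ((PySem.Chars.splitOn f ['+']).foldl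
      (fun acc i => pvCounterAdd acc (pvProcessA i)) PySem.Dict.empty).getD q 0
      = (pvTally f).getD q 0 := by
    intro q
    rw [(hA1.1 q), pvTally_getD, PySem.Dict.getD_empty]
    ring
  have hgd2 : ∀ q, ((PySem.Chars.splitOn sd ['+']).foldl
      (fun acc t => pvCounterAdd acc (pvProcessA t)) PySem.Dict.empty).getD q 0
      = (pvTally sd).getD q 0 := by
    intro q
    rw [(hA2.1 q), pvTally_getD, PySem.Dict.getD_empty]
    ring
  have e1 := pvCounterEq_iff hA1.2 hA2.2
  have e2 := pvCounterEq_iff (nodup_pvTally f) (nodup_pvTally sd)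
  have hiff : (pvCounterEq
      ((PySem.Chars.splitOn f ['+']).foldl (fun acc i => pvCounterAdd acc (pvProcessA i)) PySem.Dict.empty)
      ((PySem.Chars.splitOn sd ['+']).foldl (fun acc t => pvCounterAdd acc (pvProcessA t)) PySem.Dict.empty) = true)
      ↔ (pvCounterEq (pvTally f) (pvTally sd) = true) := by
    rw [e1, e2]
    constructor
    · intro h q; rw [← hgd q, ← hgd2 q]; exact h q
    · intro h q; rw [hgd q, hgd2 q]; exact h q
  exact Bool.eq_iff_iff.mpr hiff
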